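-- pv_equiv track=rewrite | github.com/malo-bot/malo-src | helper.py | italicize
-- ===== SOURCE A (Python) =====
-- def italicize(text):
--     original_lower = 'qwertyuiopasdfghjklzxcvbnm'
--     original_upper = 'QWERTYUIOPASDFGHJKLZXCVBNM'
--     original_numbers = '0123456789'
--     original = original_lower + original_upper + original_numbers
--     replacement = ''.join([
--         chr(0x1D622 + (ord(c) - ord('a'))) if c.islower()
--         else chr(0x1D608 + (ord(c) - ord('A'))) if c.isupper()
--         else chr(0x1D7F6 + (ord(c) - ord('0')))
--         for c in original
--     ])
--     translation_table = str.maketrans(original, replacement)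
--     return text.translate(translation_table)
-- ===== SOURCE B (Python) =====
-- def italicize(text):
--     out = []
--     for c in text:
--         if 'a' <= c <= 'z':
--             out.append(chr(0x1D622 + ord(c) - ord('a')))
--         elif 'A' <= c <= 'Z':
--             out.append(chr(0x1D608 + ord(c) - ord('A')))
--         elif '0' <= c <= '9':
--             out.append(chr(0x1D7F6 + ord(c) - ord('0')))
--         else:
--             out.append(c)
--     return ''.join(out)
-- ===== Notes on version B (the rewrite author's own statement) =====
-- stated objective: simpler
-- what changed: Replaces the maketrans/translate table (built from three alphabet strings with a per-char comprehension) by a single direct scan that maps each character with explicit ASCII-range arithmetic, no table at all.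
import Mathlib
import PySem

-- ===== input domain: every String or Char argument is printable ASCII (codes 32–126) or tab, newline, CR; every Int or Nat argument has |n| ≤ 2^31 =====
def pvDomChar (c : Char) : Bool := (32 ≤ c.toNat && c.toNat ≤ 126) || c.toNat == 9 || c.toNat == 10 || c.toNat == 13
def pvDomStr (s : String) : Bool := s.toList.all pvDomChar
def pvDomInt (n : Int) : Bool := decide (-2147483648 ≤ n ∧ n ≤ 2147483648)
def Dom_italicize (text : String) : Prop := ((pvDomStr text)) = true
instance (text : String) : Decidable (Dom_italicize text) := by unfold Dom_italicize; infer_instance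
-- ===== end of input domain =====

-- B replaces A's maketrans/translate table by a direct per-character ASCII-range arithmetic scan (simpler; return value only).

-- ===== PORT A =====
def italicizeOriginal : List Char :=
  ("qwertyuiopasdfghjklzxcvbnm".toList ++ "QWERTYUIOPASDFGHJKLZXCVBNM".toList
    ++ "0123456789".toList)

def italicizeReplacement : List Char :=
  italicizeOriginal.map (fun c =>
    if PySem.Chars.islower c then Char.ofNat (0x1D622 + (c.toNat - 'a'.toNat))
    else if PySem.Chars.isupper c then Char.ofNat (0x1D608 + (c.toNat - 'A'.toNat))
    else Char.ofNat (0x1D7F6 + (c.toNat - '0'.toNat)))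

-- str.maketrans(original, replacement) as a char→char dict; translate maps each char through it (identity when absent)
def italicizeTable : PySem.Dict Char Char :=
  PySem.Dict.ofList (italicizeOriginal.zip italicizeReplacement)

def italicize (text : String) : String :=
  String.mk (text.toList.map (fun c => (italicizeTable.get? c).getD c))

-- ===== PORT B =====
def italicizeAltChar (c : Char) : Char :=
  if 'a' ≤ c ∧ c ≤ 'z' then Char.ofNat (0x1D622 + (c.toNat - 'a'.toNat))
  else if 'A' ≤ c ∧ c ≤ 'Z' then Char.ofNat (0x1D608 + (c.toNat - 'A'.toNat))
  else if '0' ≤ c ∧ c ≤ '9' then Char.ofNat (0x1D7F6 + (c.toNat - '0'.toNat))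
  else c

def italicize_alt (text : String) : String :=
  String.mk (text.toList.map italicizeAltChar)

-- ===== PRECONDITION & SPEC =====
def Spec_italicize (text : String) (out : String) : Prop := out = italicize_alt text
instance (text : String) (out : String) : Decidable (Spec_italicize text out) := by unfold Spec_italicize; infer_instance

-- ===== CLAIM (what is proved, stated in full; the proofs are below) =====
def Claim_equal_italicize : Prop := ∀ (text : String), Dom_italicize text → Spec_italicize text (italicize text)

-- ===== LEMMAS AND PROOFS =====
-- per-character agreement on every character of the domain (finite check)
set_option maxRecDepth 4096 in
theorem italicize_char_eq (n : Nat) (hn : n < 127) :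
    ((italicizeTable.get? (Char.ofNat n)).getD (Char.ofNat n)) = italicizeAltChar (Char.ofNat n) := by
  revert hn
  revert n
  decide

set_option maxRecDepth 4096 in
theorem italicize_char_eq' (c : Char) (hc : pvDomChar c = true) :
    ((italicizeTable.get? c).getD c) = italicizeAltChar c := by
  have hs : c.toNat < 127 := by
    simp [pvDomChar] at hc
    omega
  have := italicize_char_eq c.toNat hs
  rw [Char.ofNat_toNat] at this
  exact this

-- ===== VERDICT (by name: the statement is the Claim_ definition above) =====
theorem italicize_spec : Claim_equal_italicize := by
  intro text hdom
  unfold Spec_italicize italicize italicize_alt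
  exact congrArg String.mk (List.map_congr_left fun c hc =>
    italicize_char_eq' c ((List.all_eq_true.mp hdom) c hc))
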